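-- pv_equiv track=rewrite | github.com/Adiz00/body-measurement-engine | measurement_engine.py | _size_label
-- ===== SOURCE A (Python) =====
-- def _size_label(chest, gender="neutral"):
--     if gender == "female":
--         tbl = [(76,"XS"),(84,"S"),(92,"M"),(100,"L"),(108,"XL"),(116,"2XL")]
--     else:
--         tbl = [(88,"XS"),(96,"S"),(104,"M"),(112,"L"),(120,"XL"),(128,"2XL")]
--     for upper, lbl in tbl:
--         if chest <= upper: return lbl
--     return "3XL"
-- ===== SOURCE B (Python) =====
-- def _size_label(chest, gender="neutral"):
--     base = 76 if gender == "female" else 88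
--     thresholds = [base, base + 8, base + 16, base + 24, base + 32, base + 40]
--     labels = ["XS", "S", "M", "L", "XL", "2XL", "3XL"]
--     lo, hi = 0, 6
--     while lo < hi:
--         mid = (lo + hi) // 2
--         if thresholds[mid] < chest:
--             lo = mid + 1
--         else:
--             hi = mid
--     return labels[lo]
-- ===== Notes on version B (the rewrite author's own statement) =====
-- stated objective: alternative
-- what changed: Replaces the linear scan over (threshold,label) pairs with a hand-written binary search (bisect_left) over an arithmetically generated thresholds list, indexing into a parallel labels list.
import Mathlib
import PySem

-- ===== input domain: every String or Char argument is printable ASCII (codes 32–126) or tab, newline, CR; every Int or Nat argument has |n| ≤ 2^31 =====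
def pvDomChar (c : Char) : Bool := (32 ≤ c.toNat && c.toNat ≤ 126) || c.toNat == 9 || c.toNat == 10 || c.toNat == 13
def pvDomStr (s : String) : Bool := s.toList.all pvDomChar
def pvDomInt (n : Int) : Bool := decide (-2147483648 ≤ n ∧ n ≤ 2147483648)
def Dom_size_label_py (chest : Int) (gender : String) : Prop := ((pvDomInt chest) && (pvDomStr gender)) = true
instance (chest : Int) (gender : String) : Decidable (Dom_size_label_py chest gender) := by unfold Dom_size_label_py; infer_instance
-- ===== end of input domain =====

-- B replaces A's linear scan of a (threshold,label) table by a binary search over an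
-- arithmetically generated thresholds list with a parallel labels list (alternative structure).

-- ===== PORT A =====
-- the 'for upper, lbl in tbl: if chest <= upper: return lbl' loop, early return and all
def sizeScan (chest : Int) : List (Int × String) → String
  | [] => "3XL"
  | (upper, lbl) :: rest => if chest ≤ upper then lbl else sizeScan chest rest

def size_label_py (chest : Int) (gender : String) : String :=
  let tbl : List (Int × String) :=
    if gender == "female" then
      [(76,"XS"),(84,"S"),(92,"M"),(100,"L"),(108,"XL"),(116,"2XL")]
    else
      [(88,"XS"),(96,"S"),(104,"M"),(112,"L"),(120,"XL"),(128,"2XL")]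
  sizeScan chest tbl

-- ===== PORT B =====
-- the 'while lo < hi' binary-search loop of Source B, step for step
def bisectLoop (ths : List Int) (chest : Int) (lo hi : Nat) : Nat :=
  if lo < hi then
    let mid := (lo + hi) / 2
    if ths.getD mid 0 < chest then bisectLoop ths chest (mid + 1) hi
    else bisectLoop ths chest lo mid
  else lo
termination_by hi - lo
decreasing_by all_goals omega

def size_label_py_alt (chest : Int) (gender : String) : String :=
  let base : Int := if gender == "female" then 76 else 88
  let thresholds : List Int := [base, base + 8, base + 16, base + 24, base + 32, base + 40]
  let labels : List String := ["XS", "S", "M", "L", "XL", "2XL", "3XL"]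
  labels.getD (bisectLoop thresholds chest 0 6) "3XL"

-- ===== PRECONDITION & SPEC =====
def Spec_size_label_py (chest : Int) (gender : String) (out : String) : Prop := out = size_label_py_alt chest gender
instance (chest : Int) (gender : String) (out : String) : Decidable (Spec_size_label_py chest gender out) := by unfold Spec_size_label_py; infer_instance

-- ===== CLAIM (what is proved, stated in full; the proofs are below) =====
def Claim_equal_size_label_py : Prop := ∀ (chest : Int) (gender : String), Dom_size_label_py chest gender → Spec_size_label_py chest gender (size_label_py chest gender)

-- ===== LEMMAS AND PROOFS =====

-- both programs, specialised to one gender table with first threshold `base`, agree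
lemma key (chest base : Int) :
    sizeScan chest [(base,"XS"),(base+8,"S"),(base+16,"M"),(base+24,"L"),(base+32,"XL"),(base+40,"2XL")]
      = (["XS","S","M","L","XL","2XL","3XL"] : List String).getD
          (bisectLoop [base, base + 8, base + 16, base + 24, base + 32, base + 40] chest 0 6) "3XL" := by
  by_cases h0 : chest ≤ base
  · simp [sizeScan, bisectLoop.eq_def, h0, show ¬ (base + 24 < chest) by omega,
      show ¬ (base + 8 < chest) by omega, show ¬ (base < chest) by omega]
  by_cases h1 : chest ≤ base + 8
  · simp [sizeScan, bisectLoop.eq_def, h0, h1, show ¬ (base + 24 < chest) by omega,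
      show ¬ (base + 8 < chest) by omega, show base < chest by omega]
  by_cases h2 : chest ≤ base + 16
  · simp [sizeScan, bisectLoop.eq_def, h2, show ¬ (base + 24 < chest) by omega,
      show ¬ (base + 16 < chest) by omega, show base + 8 < chest by omega, show ¬ chest ≤ base by omega,
      show ¬ chest ≤ base + 8 by omega]
  by_cases h3 : chest ≤ base + 24
  · simp [sizeScan, bisectLoop.eq_def, h3, show ¬ (base + 24 < chest) by omega,
      show base + 8 < chest by omega, show base + 16 < chest by omega,
      show ¬ chest ≤ base by omega, show ¬ chest ≤ base + 8 by omega,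
      show ¬ chest ≤ base + 16 by omega]
  by_cases h4 : chest ≤ base + 32
  · simp [sizeScan, bisectLoop.eq_def, h4, show base + 24 < chest by omega,
      show ¬ (base + 32 < chest) by omega, show ¬ (base + 40 < chest) by omega,
      show ¬ chest ≤ base by omega, show ¬ chest ≤ base + 8 by omega,
      show ¬ chest ≤ base + 16 by omega, show ¬ chest ≤ base + 24 by omega]
  by_cases h5 : chest ≤ base + 40
  · simp [sizeScan, bisectLoop.eq_def, h5, show base + 24 < chest by omega,
      show ¬ (base + 40 < chest) by omega, show base + 32 < chest by omega,
      show ¬ chest ≤ base by omega, show ¬ chest ≤ base + 8 by omega,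
      show ¬ chest ≤ base + 16 by omega, show ¬ chest ≤ base + 24 by omega,
      show ¬ chest ≤ base + 32 by omega]
  · simp [sizeScan, bisectLoop.eq_def, show base + 24 < chest by omega,
      show base + 40 < chest by omega,
      show ¬ chest ≤ base by omega, show ¬ chest ≤ base + 8 by omega,
      show ¬ chest ≤ base + 16 by omega, show ¬ chest ≤ base + 24 by omega,
      show ¬ chest ≤ base + 32 by omega, show ¬ chest ≤ base + 40 by omega]

-- ===== VERDICT (by name: the statement is the Claim_ definition above) =====
theorem size_label_py_spec : Claim_equal_size_label_py := by
  intro chest gender _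
  unfold Spec_size_label_py size_label_py size_label_py_alt
  cases h : gender == "female"
  · simp only [Bool.false_eq_true, if_false]
    have := key chest 88; norm_num at this ⊢; exact this
  · simp only [if_true]
    have := key chest 76; norm_num at this ⊢; exact this
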